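-- pv_equiv track=rewrite | github.com/jlittle289/AdventOfCode | 2025/6/day6.py | part1
-- ===== SOURCE A (Python) =====
-- import math
--
-- def part1(text:str):
--     total = 0
--
--     rows = text.split("\n")
--     operations = rows.pop().split()
--
--     rows = [row.split() for row in rows]
--
--     problems = [[int(row[i]) for row in rows] for i in range(len(operations))]
--
--     for i, op in enumerate(operations):
--         if op == "+":
--             value = sum(problems[i])
--         else:
--             value = math.prod(problems[i])
--
--         total += value
--
--     return total
-- ===== SOURCE B (Python) =====
-- def part1(text: str):
--     rows = text.split("\n")
--     ops = rows.pop().split()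
--     accs = [0 if op == "+" else 1 for op in ops]
--     for row in rows:
--         toks = row.split()
--         accs = [a + int(t) if op == "+" else a * int(t)
--                 for a, op, t in zip(accs, ops, toks)]
--     return sum(accs)
-- ===== Notes on version B (the rewrite author's own statement) =====
-- stated objective: alternative
-- what changed: B drops A's transpose-into-columns-and-reduce (building problems[i] lists, then sum/prod per column): it seeds one accumulator per operation (0 for '+', 1 for '*') and folds each data row into all accumulators in a single row-major pass, returning the accumulators' sum.
import Mathlib
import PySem

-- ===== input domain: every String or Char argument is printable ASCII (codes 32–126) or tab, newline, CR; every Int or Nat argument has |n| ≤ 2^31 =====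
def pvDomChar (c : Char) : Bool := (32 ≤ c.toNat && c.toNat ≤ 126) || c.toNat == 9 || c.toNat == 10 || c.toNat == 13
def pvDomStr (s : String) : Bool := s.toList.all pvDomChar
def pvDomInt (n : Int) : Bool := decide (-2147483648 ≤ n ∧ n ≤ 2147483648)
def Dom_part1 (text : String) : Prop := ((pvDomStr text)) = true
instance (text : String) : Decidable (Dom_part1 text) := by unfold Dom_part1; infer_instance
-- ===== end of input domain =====

-- B replaces A's transpose-into-columns-then-reduce with a single row-major pass that
-- streams each row into one accumulator per operation (0 for '+', 1 for '*'); objective: alternative.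

-- ===== PORT A =====
def part1 (text : String) : Int :=
  let rows := PySem.Chars.splitOn text.toList ['\n']
  -- rows.pop(): text.split("\n") is never empty, so pop returns the last line and leaves the rest
  let operations := PySem.Chars.split₀ rows.getLast!
  let drows := rows.dropLast.map PySem.Chars.split₀
  let problems := (PySem.List.pyRange 0 (operations.length : Int) 1).map
      (fun i => drows.map (fun row => (PySem.Int.ofChars? (PySem.List.pyGetD row i [])).getD 0))
  (PySem.List.enumerate operations 0).foldl
    (fun total p =>
      let value := if p.2 = ['+'] then (PySem.List.pyGetD problems p.1 ([] : List Int)).sum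
                   else (PySem.List.pyGetD problems p.1 ([] : List Int)).prod
      total + value) 0

-- ===== PORT B =====
def part1_alt (text : String) : Int :=
  let rows := PySem.Chars.splitOn text.toList ['\n']
  let ops := PySem.Chars.split₀ rows.getLast!
  let accs := rows.dropLast.foldl
    (fun accs row =>
      (accs.zip (ops.zip (PySem.Chars.split₀ row))).map
        (fun x => if x.2.1 = ['+'] then x.1 + (PySem.Int.ofChars? x.2.2).getD 0
                  else x.1 * (PySem.Int.ofChars? x.2.2).getD 0))
    (ops.map (fun op => if op = ['+'] then (0 : Int) else 1))
  accs.sum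

-- ===== PRECONDITION & SPEC =====
-- Pre_ excludes exactly the inputs where A raises: a data row with fewer whitespace-separated
-- tokens than the operations line (IndexError) or with a non-integer token among the first
-- len(operations) ones (ValueError).
def Pre_part1 (text : String) : Prop :=
  let rows := PySem.Chars.splitOn text.toList ['\n']
  let ops := PySem.Chars.split₀ rows.getLast!
  ∀ row ∈ rows.dropLast,
    ops.length ≤ (PySem.Chars.split₀ row).length ∧
    ∀ tok ∈ (PySem.Chars.split₀ row).take ops.length, (PySem.Int.ofChars? tok).isSome

instance (text : String) : Decidable (Pre_part1 text) := by unfold Pre_part1; infer_instance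

def pvWitness_part1 : String := "1 2\n3 4\n+ *"

def Spec_part1 (text : String) (out : Int) : Prop := out = part1_alt text
instance (text : String) (out : Int) : Decidable (Spec_part1 text out) := by unfold Spec_part1; infer_instance

-- ===== CLAIM (what is proved, stated in full; the proofs are below) =====
def Claim_equal_part1 : Prop := ∀ (text : String), Dom_part1 text → Pre_part1 text → Spec_part1 text (part1 text)

-- ===== LEMMAS AND PROOFS =====

def pvVal (row : List Char) (k : Nat) : Int :=
  (PySem.Int.ofChars? ((PySem.Chars.split₀ row).getD k [])).getD 0

def pvStep (op : List Char) (a x : Int) : Int := if op = ['+'] then a + x else a * x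

lemma pv_map_getD_range {α : Type} (l : List α) (d : α) :
    (List.range l.length).map (fun k => l.getD k d) = l := by
  apply List.ext_getElem
  · simp
  · intro i h1 h2
    simp [List.getD_eq_getElem?_getD, List.getElem?_eq_getElem h2]

lemma pv_foldB (ops : List (List Char)) (rs : List (List Char)) (accs : List Int)
    (hlen : accs.length = ops.length)
    (hr : ∀ r ∈ rs, ops.length ≤ (PySem.Chars.split₀ r).length) :
    rs.foldl (fun accs row =>
      (accs.zip (ops.zip (PySem.Chars.split₀ row))).map
        (fun x => if x.2.1 = ['+'] then x.1 + (PySem.Int.ofChars? x.2.2).getD 0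
                  else x.1 * (PySem.Int.ofChars? x.2.2).getD 0)) accs
    = (List.range ops.length).map (fun k =>
        rs.foldl (fun a row => pvStep (ops.getD k []) a (pvVal row k)) (accs.getD k 0)) := by
  induction rs generalizing accs with
  | nil =>
      simp only [List.foldl_nil]
      rw [← hlen]
      exact (pv_map_getD_range accs 0).symm
  | cons r rs ih =>
      have hrr := hr r (by simp)
      have hlen' : ((accs.zip (ops.zip (PySem.Chars.split₀ r))).map
        (fun x => if x.2.1 = ['+'] then x.1 + (PySem.Int.ofChars? x.2.2).getD 0
                  else x.1 * (PySem.Int.ofChars? x.2.2).getD 0)).length = ops.length := by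
        simp [List.length_zip, hlen]; omega
      simp only [List.foldl_cons]
      rw [ih _ hlen' (fun x hx => hr x (by simp [hx]))]
      apply List.map_congr_left
      intro k hk
      simp only [List.mem_range] at hk
      congr 1
      have hk1 : k < accs.length := by omega
      have hk2 : k < (PySem.Chars.split₀ r).length := by omega
      have hkz : k < ((accs.zip (ops.zip (PySem.Chars.split₀ r)))).length := by
        simp [List.length_zip]; omega
      rw [List.getD_eq_getElem _ _ (by simpa using hkz), List.getElem_map, List.getElem_zip, List.getElem_zip]
      simp [pvStep, pvVal, List.getElem?_eq_getElem hk, List.getElem?_eq_getElem hk1, List.getElem?_eq_getElem hk2]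

lemma pv_col (op : List Char) (k : Nat) (rs : List (List Char)) :
    (if op = ['+'] then (rs.map (fun row => pvVal row k)).sum
     else (rs.map (fun row => pvVal row k)).prod)
    = rs.foldl (fun a row => pvStep op a (pvVal row k)) (if op = ['+'] then 0 else 1) := by
  by_cases h : op = ['+'] <;>
    simp [pvStep, h, List.sum_eq_foldl, List.prod_eq_foldl, List.foldl_map]

theorem main (text : String) (hpre : Pre_part1 text) : part1 text = part1_alt text := by
  simp only [part1, part1_alt, Pre_part1] at *
  set rows := PySem.Chars.splitOn text.toList ['\n'] with hrows
  set os := PySem.Chars.split₀ rows.getLast! with hos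
  set drs := rows.dropLast with hdrs
  rw [PySem.List.foldl_add]
  rw [pv_foldB os drs _ (by simp) (fun r hr => (hpre r hr).1)]
  rw [PySem.List.enumerate_eq_map_pyRange os [], List.map_map]
  simp only [PySem.List.len_eq]
  rw [PySem.List.pyRange_zero_nat os.length, List.map_map]
  rw [zero_add]
  apply congrArg List.sum
  apply List.map_congr_left
  intro k hk
  simp only [List.mem_range] at hk
  simp only [Function.comp_apply, PySem.List.pyGetD_natCast, List.map_map]
  rw [PySem.List.getD_map_range _ _ _ _ hk]
  have hinit : (List.map (fun op => if op = ['+'] then (0:Int) else 1) os).getD k 0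
      = if os.getD k [] = ['+'] then (0:Int) else 1 := by
    rw [List.getD_eq_getElem _ _ (by simpa using hk), List.getElem_map,
      List.getD_eq_getElem _ _ hk]
  rw [hinit, ← pv_col]
  simp [pvVal, Function.comp_def]

-- ===== VERDICT (by name: the statement is the Claim_ definition above) =====
theorem part1_spec : Claim_equal_part1 := by
  intro text _ hpre
  exact main text hpre
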